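-- pv_equiv track=rewrite | github.com/AdamZhouSE/pythonHomework | Code/CodeRecords/2529/60643/240485.py | resort
-- ===== SOURCE A (Python) =====
-- def resort(nStr):
--     res="false"
--     for i in range(0,31):
--         temp=sorted(str(2**i))
--         if temp==sorted(nStr):
--             res="true"
--             return res
--         elif len(temp)>len(nStr):
--             return res
--     return res
-- ===== SOURCE B (Python) =====
-- _POWERS = {tuple(sorted(str(2 ** i))) for i in range(31)}
--
--
-- def resort(nStr):
--     return "true" if tuple(sorted(nStr)) in _POWERS else "false"
-- ===== Notes on version B (the rewrite author's own statement) =====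
-- stated objective: idiomatic
-- what changed: Replaces the per-call scan over the 31 powers of two (sort-and-compare with early length exit each iteration) by a module-level precomputed set of sorted digit signatures and a single membership lookup per call.
import Mathlib
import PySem

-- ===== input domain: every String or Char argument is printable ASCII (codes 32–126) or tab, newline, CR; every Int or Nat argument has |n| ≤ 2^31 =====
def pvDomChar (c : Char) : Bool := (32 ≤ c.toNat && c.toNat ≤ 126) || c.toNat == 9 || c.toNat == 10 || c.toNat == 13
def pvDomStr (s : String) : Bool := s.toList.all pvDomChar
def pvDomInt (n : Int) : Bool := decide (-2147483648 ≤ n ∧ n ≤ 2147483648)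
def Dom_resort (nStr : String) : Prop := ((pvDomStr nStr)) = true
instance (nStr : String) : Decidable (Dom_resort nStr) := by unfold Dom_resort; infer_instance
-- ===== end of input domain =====

-- B precomputes the set of sorted digit-signatures of 2^0..2^30 once and answers by one membership test (idiomatic).

-- ===== PORT A =====
-- sorted(str(2**i)) for the loop body
def pvSig (i : Int) : List Char :=
  PySem.List.sorted (PySem.Int.toChars (2 ^ i.toNat)) (fun x => x) false

-- the 'for i in range(0,31)' loop with its two early returns
def pvLoop (cs : List Char) : List Int → String
  | [] => "false"
  | i :: rest =>
    let temp := pvSig i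
    if temp = PySem.List.sorted cs (fun x => x) false then "true"
    else if cs.length < temp.length then "false"
    else pvLoop cs rest

def resort (nStr : String) : String :=
  pvLoop nStr.toList (PySem.List.pyRange 0 31 1)

-- ===== PORT B =====
-- module-level table: {tuple(sorted(str(2**i))) for i in range(31)}
def pvPowers : PySem.Set (List Char) :=
  PySem.Set.ofList
    ((PySem.List.pyRange 0 31 1).map
      (fun i => PySem.List.sorted (PySem.Int.toChars (2 ^ i.toNat)) (fun x => x) false))

def resort_alt (nStr : String) : String :=
  if PySem.Set.contains pvPowers (PySem.List.sorted nStr.toList (fun x => x) false)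
  then "true" else "false"

-- ===== PRECONDITION & SPEC =====
def Spec_resort (nStr : String) (out : String) : Prop := out = resort_alt nStr
instance (nStr : String) (out : String) : Decidable (Spec_resort nStr out) := by unfold Spec_resort; infer_instance

-- ===== CLAIM (what is proved, stated in full; the proofs are below) =====
def Claim_equal_resort : Prop := ∀ (nStr : String), Dom_resort nStr → Spec_resort nStr (resort nStr)

-- ===== LEMMAS AND PROOFS =====

-- A's loop over an index list whose signatures have nondecreasing lengths is a membership test.
theorem pvLoop_spec (cs : List Char) (is : List Int)
    (hmono : is.Pairwise (fun a b => (pvSig a).length ≤ (pvSig b).length)) :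
    pvLoop cs is =
      if PySem.List.sorted cs (fun x => x) false ∈ is.map pvSig then "true" else "false" := by
  induction is with
  | nil => simp [pvLoop]
  | cons i rest ih =>
    rcases List.pairwise_cons.mp hmono with ⟨hhead, htail⟩
    by_cases heq : pvSig i = PySem.List.sorted cs (fun x => x) false
    · simp [pvLoop, heq]
    · by_cases hlen : cs.length < (pvSig i).length
      · have hne : ∀ j ∈ rest, pvSig j ≠ PySem.List.sorted cs (fun x => x) false := by
          intro j hj habs
          have h1 : (pvSig i).length ≤ (pvSig j).length := hhead j hj
          have h2 : (PySem.List.sorted cs (fun x => x) false).length = cs.length :=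
            PySem.List.length_sorted cs (fun x => x) false
          rw [habs] at h1
          omega
        have hnotmem : PySem.List.sorted cs (fun x => x) false ∉ (i :: rest).map pvSig := by
          intro h
          rcases List.mem_cons.mp h with h | h
          · exact heq h.symm
          · obtain ⟨j, hj, hjeq⟩ := List.mem_map.mp h
            exact hne j hj hjeq
        rw [show pvLoop cs (i :: rest) = "false" from by simp [pvLoop, heq, hlen]]
        rw [if_neg hnotmem]
      · rw [show pvLoop cs (i :: rest) = pvLoop cs rest by simp [pvLoop, heq, hlen]]
        rw [ih htail]
        have : (PySem.List.sorted cs (fun x => x) false ∈ (i :: rest).map pvSig) ↔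
               (PySem.List.sorted cs (fun x => x) false ∈ rest.map pvSig) := by
          simp only [List.map_cons, List.mem_cons]
          constructor
          · rintro (h | h)
            · exact absurd h.symm heq
            · exact h
          · exact Or.inr
        rw [if_congr this rfl rfl]

theorem pvMono :
    (PySem.List.pyRange 0 31 1).Pairwise (fun a b => (pvSig a).length ≤ (pvSig b).length) := by
  decide

-- ===== VERDICT (by name: the statement is the Claim_ definition above) =====
theorem resort_spec : Claim_equal_resort := by
  intro nStr _
  unfold Spec_resort resort resort_alt pvPowers
  rw [pvLoop_spec nStr.toList _ pvMono]
  have hmem : (PySem.List.sorted nStr.toList (fun x => x) false ∈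
      (PySem.List.pyRange 0 31 1).map pvSig) ↔
      PySem.Set.contains
        (PySem.Set.ofList ((PySem.List.pyRange 0 31 1).map
          (fun i => PySem.List.sorted (PySem.Int.toChars (2 ^ i.toNat)) (fun x => x) false)))
        (PySem.List.sorted nStr.toList (fun x => x) false) = true := by
    simp [PySem.Set.contains, PySem.Set.mem_ofList, pvSig]
  rw [if_congr hmem rfl rfl]
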